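-- pv_equiv track=rewrite | github.com/saycmily/co | leecode/501-1000/685-冗余连接Ⅱ.py | findRedundantDirectedConnection
-- ===== SOURCE A (Python) =====
-- class UnionFind(object):
--     def __init__(self, n):
--         self.pre = list(range(n+1))
--
--     def find(self, x):
--         if x != self.pre[x]:
--             self.pre[x] = self.find(self.pre[x])
--         return self.pre[x]
--
--     def union(self, x1, x2):
--         root1 = self.find(x1)
--         root2 = self.find(x2)
--         if root1 != root2:
--             self.pre[root2] = root1
--             return True
--         return  False
--
-- def findRedundantDirectedConnection(edges):
--     """
--     :type edges: List[List[int]]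
--     :rtype: List[int]
--     """
--     n = len(edges)
--     uf = UnionFind(n)
--     last, parent, candidates = [], {}, []
--     for st, ed in edges:
--         if ed in parent:
--             candidates.append([parent[ed], ed])
--             candidates.append([st, ed])
--         else:
--             parent[ed] = st
--             if not uf.union(st, ed):
--                 last = [st, ed]
--     if not candidates:
--         return last
--     return candidates[0] if last else candidates[1]
-- ===== SOURCE B (Python) =====
-- def findRedundantDirectedConnection(edges):
--     """
--     :type edges: List[List[int]]
--     :rtype: List[int]
--     """
--     n = len(edges)
--     comp = list(range(n + 1))  # flat component labels: comp[x] is x's representative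
--     last = []
--     cand = None  # (cand1, cand2) from the FIRST node seen with two parents
--     parent = {}
--     for st, ed in edges:
--         if ed in parent:
--             if cand is None:
--                 cand = ([parent[ed], ed], [st, ed])
--         else:
--             parent[ed] = st
--             a, b = comp[st], comp[ed]
--             if a == b:
--                 last = [st, ed]
--             else:
--                 comp = [a if c == b else c for c in comp]
--     if cand is None:
--         return last
--     return cand[0] if last else cand[1]
-- ===== Notes on version B (the rewrite author's own statement) =====
-- stated objective: alternative
-- what changed: replaces the recursive path-compressing union-find with a single pass over a flat component-label array relabelled wholesale on each merge, and records only the first duplicate-parent candidate pair instead of an append-only candidates list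
import Mathlib
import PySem

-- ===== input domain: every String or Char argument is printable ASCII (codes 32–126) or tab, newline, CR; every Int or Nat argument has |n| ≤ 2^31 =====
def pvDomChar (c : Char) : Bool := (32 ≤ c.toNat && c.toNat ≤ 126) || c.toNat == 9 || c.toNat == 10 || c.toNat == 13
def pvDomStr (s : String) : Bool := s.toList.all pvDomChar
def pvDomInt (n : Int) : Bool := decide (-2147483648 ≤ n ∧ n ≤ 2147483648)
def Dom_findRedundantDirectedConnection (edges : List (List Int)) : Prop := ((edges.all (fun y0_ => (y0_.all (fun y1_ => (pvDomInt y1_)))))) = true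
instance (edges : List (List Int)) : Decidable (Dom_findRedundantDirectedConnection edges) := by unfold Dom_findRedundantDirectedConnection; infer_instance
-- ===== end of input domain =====

-- B replaces A's recursive path-compressing union-find with a single pass over a flat
-- component-label array relabelled wholesale on each merge (objective: alternative, not faster).

-- ===== PORT A =====
-- UnionFind.find with path compression; fuel n+1 suffices (tree depth ≤ number of unions < n+1),
-- the 0-fuel branch is unreachable on admitted inputs.
def findA : Nat → List Int → Int → List Int × Int
  | 0, pre, x => (pre, x)
  | f + 1, pre, x =>
    let px := PySem.List.pyGetD pre x 0
    if x ≠ px then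
      let r := findA f pre px
      let pre2 := PySem.List.pySetD r.1 x r.2
      (pre2, PySem.List.pyGetD pre2 x 0)
    else (pre, px)

def unionA (pre : List Int) (x1 x2 : Int) : List Int × Bool :=
  let f1 := findA pre.length pre x1
  let f2 := findA f1.1.length f1.1 x2
  if f1.2 ≠ f2.2 then (PySem.List.pySetD f2.1 f2.2 f1.2, true) else (f2.1, false)

-- state: (pre, last, parent, candidates)
def stepA (st : List Int × List Int × PySem.Dict Int Int × List (List Int)) (e : List Int) :
    List Int × List Int × PySem.Dict Int Int × List (List Int) :=
  match e with
  | [u, v] =>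
    if st.2.2.1.contains v then
      (st.1, st.2.1, st.2.2.1, st.2.2.2 ++ [[st.2.2.1.getD v 0, v], [u, v]])
    else
      let parent' := st.2.2.1.insert v u
      let r := unionA st.1 u v
      if r.2 then (r.1, st.2.1, parent', st.2.2.2)
      else (r.1, [u, v], parent', st.2.2.2)
  | _ => st  -- Python raises ValueError here (edge arity ≠ 2); excluded by Pre_

def findRedundantDirectedConnection (edges : List (List Int)) : List Int :=
  let n := edges.length
  let st := edges.foldl stepA
    ((List.range (n + 1)).map Int.ofNat, ([] : List Int),
      (PySem.Dict.empty : PySem.Dict Int Int), ([] : List (List Int)))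
  if st.2.2.2 = [] then st.2.1
  else if st.2.1 ≠ [] then st.2.2.2.getD 0 [] else st.2.2.2.getD 1 []

-- ===== PORT B =====
-- state: (comp, last, cand, parent)
def stepB (st : List Int × List Int × Option (List Int × List Int) × PySem.Dict Int Int) (e : List Int) :
    List Int × List Int × Option (List Int × List Int) × PySem.Dict Int Int :=
  match e with
  | [u, v] =>
    if st.2.2.2.contains v then
      (st.1, st.2.1,
        (match st.2.2.1 with
         | none => some ([st.2.2.2.getD v 0, v], [u, v])
         | some c => some c), st.2.2.2)
    else
      let parent' := st.2.2.2.insert v u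
      let a := PySem.List.pyGetD st.1 u 0
      let b := PySem.List.pyGetD st.1 v 0
      if a = b then (st.1, [u, v], st.2.2.1, parent')
      else (st.1.map (fun c => if c = b then a else c), st.2.1, st.2.2.1, parent')
  | _ => st  -- Python raises ValueError here (edge arity ≠ 2); excluded by Pre_

def findRedundantDirectedConnection_alt (edges : List (List Int)) : List Int :=
  let n := edges.length
  let st := edges.foldl stepB
    ((List.range (n + 1)).map Int.ofNat, ([] : List Int),
      (none : Option (List Int × List Int)), (PySem.Dict.empty : PySem.Dict Int Int))
  match st.2.2.1 with
  | none => st.2.1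
  | some c => if st.2.1 ≠ [] then c.1 else c.2

-- ===== PRECONDITION & SPEC =====
-- Pre_ admits exactly the inputs on which A returns: every edge has arity 2 (else Python's
-- unpacking raises ValueError) and every edge whose child is not a repeat of an earlier child
-- has both endpoints inside Python's index range -(n+1)..n for the parent array (else find
-- raises IndexError); repeated-child edges are never indexed, so they are unconstrained.
def Pre_findRedundantDirectedConnection (edges : List (List Int)) : Prop :=
  ∀ i < edges.length, (edges.getD i []).length = 2 ∧
    ((edges.getD i []).getD 1 0 ∈ (edges.take i).map (fun e => e.getD 1 0) ∨
      (-(edges.length + 1 : Int) ≤ (edges.getD i []).getD 0 0 ∧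
        (edges.getD i []).getD 0 0 ≤ (edges.length : Int) ∧
        -(edges.length + 1 : Int) ≤ (edges.getD i []).getD 1 0 ∧
        (edges.getD i []).getD 1 0 ≤ (edges.length : Int)))
instance (edges : List (List Int)) : Decidable (Pre_findRedundantDirectedConnection edges) := by
  unfold Pre_findRedundantDirectedConnection; infer_instance

def pvWitness_findRedundantDirectedConnection : List (List Int) := [[1, 2], [1, 3], [2, 3]]

def Spec_findRedundantDirectedConnection (edges : List (List Int)) (out : List Int) : Prop := out = findRedundantDirectedConnection_alt edges
instance (edges : List (List Int)) (out : List Int) : Decidable (Spec_findRedundantDirectedConnection edges out) := by unfold Spec_findRedundantDirectedConnection; infer_instance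

-- ===== CLAIM (what is proved, stated in full; the proofs are below) =====
def Claim_equal_findRedundantDirectedConnection : Prop := ∀ (edges : List (List Int)), Dom_findRedundantDirectedConnection edges → Pre_findRedundantDirectedConnection edges → Spec_findRedundantDirectedConnection edges (findRedundantDirectedConnection edges)

-- ===== LEMMAS AND PROOFS =====

-- Nat-level view of an in-range entry
def nth (l : List Int) (i : Nat) : Int := l.getD i 0

-- Invariant tying A's parent forest `pre` to B's flat label array `comp`:
-- labels are idempotent pre-fixpoints, one pre-step keeps the label, and `d`
-- strictly decreases along non-trivial pre-steps (so find terminates at the label).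
def UFInv (N : Nat) (pre comp : List Int) (d : Nat → Nat) : Prop :=
  pre.length = N ∧ comp.length = N ∧
  (∀ i < N, ∃ c : Nat, nth comp i = (c : Int) ∧ c < N ∧ nth comp c = (c : Int) ∧ nth pre c = (c : Int)) ∧
  (∀ i < N, ∃ p : Nat, nth pre i = (p : Int) ∧ p < N ∧ nth comp p = nth comp i ∧
    (p = i → nth comp i = (i : Int) ∧ d i = 0) ∧ (p ≠ i → d p < d i))

def CandRel (cands : List (List Int)) (cand : Option (List Int × List Int)) : Prop :=
  match cand with
  | none => cands = []
  | some c => ∃ rest, cands = c.1 :: c.2 :: rest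

-- a Python index into the length-N parent array, and its canonical Nat position
def InR (N : Nat) (x : Int) : Prop := -(N : Int) ≤ x ∧ x < (N : Int)

def ixN (N : Nat) (x : Int) : Nat := if x < 0 then (x + (N : Int)).toNat else x.toNat

def StInv (N s : Nat) (chs : List Int)
    (stA : List Int × List Int × PySem.Dict Int Int × List (List Int))
    (stB : List Int × List Int × Option (List Int × List Int) × PySem.Dict Int Int) : Prop :=
  (∃ d, UFInv N stA.1 stB.1 d ∧ ∀ i < N, d i ≤ s) ∧
  stA.2.1 = stB.2.1 ∧ stA.2.2.1 = stB.2.2.2 ∧ CandRel stA.2.2.2 stB.2.2.1 ∧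
  (∀ x : Int, stA.2.2.1.contains x = true ↔ x ∈ chs)

lemma nth_set_self {l : List Int} {i : Nat} (h : i < l.length) (v : Int) :
    nth (l.set i v) i = v := by
  simp [nth, List.getD_eq_getElem?_getD, h]

lemma nth_set_ne {l : List Int} {i j : Nat} (h : j ≠ i) (v : Int) :
    nth (l.set i v) j = nth l j := by
  simp [nth, List.getD_eq_getElem?_getD, List.getElem?_set_ne (by omega : i ≠ j)]

lemma nth_map {l : List Int} {i : Nat} (h : i < l.length) (f : Int → Int) :
    nth (l.map f) i = f (nth l i) := by
  rw [nth, nth, List.getD_eq_getElem _ _ (by simpa using h), List.getD_eq_getElem _ _ h]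
  simp

-- a node whose label is itself is a root
lemma label_self_root {N : Nat} {pre comp : List Int} {d : Nat → Nat}
    (hI : UFInv N pre comp d) {x : Nat} (hx : x < N) (hcx : nth comp x = (x : Int)) :
    nth pre x = (x : Int) := by
  obtain ⟨c, hc1, hcN, hcc, hpc⟩ := hI.2.2.1 x hx
  have hcx2 : (c : Int) = (x : Int) := hc1.symm.trans hcx
  have : c = x := by exact_mod_cast hcx2
  subst this; exact hpc

lemma findA_spec {N : Nat} {comp : List Int} {d : Nat → Nat} :
    ∀ (fuel : Nat) (pre : List Int) (x : Nat), UFInv N pre comp d → x < N → d x < fuel →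
    ∃ pre', findA fuel pre (x : Int) = (pre', nth comp x) ∧ UFInv N pre' comp d := by
  intro fuel
  induction fuel with
  | zero => intro pre x hI hx hd; omega
  | succ f ih =>
    intro pre x hI hx hd
    obtain ⟨hlp, hlc, h3, h4⟩ := hI
    obtain ⟨p, hpx, hpN, hcomp, hself, hdec⟩ := h4 x hx
    have hget : PySem.List.pyGetD pre (x : Int) 0 = (p : Int) := by
      simpa [nth] using hpx
    by_cases hpeq : p = x
    · subst hpeq
      refine ⟨pre, ?_, hlp, hlc, h3, h4⟩
      have hcx := (hself rfl).1
      simp [findA, hget, hcx]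
    · -- x is not a root: recurse on p, then compress x to the root
      have hcomp_x_ne : nth comp x ≠ (x : Int) := by
        intro hcx
        have hxp : (x : Int) = (p : Int) :=
          (label_self_root ⟨hlp, hlc, h3, h4⟩ hx hcx).symm.trans hpx
        exact hpeq (by exact_mod_cast hxp.symm)
      have hdp : d p < f := by have := hdec hpeq; omega
      obtain ⟨pre1, hrec, hI1⟩ := ih pre p ⟨hlp, hlc, h3, h4⟩ hpN hdp
      obtain ⟨hlp1, _, h31, h41⟩ := hI1
      have hx1 : x < pre1.length := by omega
      have hset : nth (pre1.set x (nth comp p)) x = nth comp p := nth_set_self hx1 _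
      have hcompx : nth comp p = nth comp x := hcomp
      refine ⟨pre1.set x (nth comp p), ?_, ?_⟩
      · have hne : (x : Int) ≠ (p : Int) := by
          intro h; exact hpeq (by exact_mod_cast h.symm)
        simp only [findA, hget]
        rw [if_pos hne, hrec]
        have hcompx2 := hcompx
        simp only [nth, List.getD_eq_getElem?_getD] at hcompx2
        simp [PySem.List.pySetD_natCast, hcompx2, nth, List.getD_eq_getElem?_getD, hx1]
      · -- the invariant survives the compression write at x
        refine ⟨by simpa using hlp1, hlc, ?_, ?_⟩
        · intro i hi
          obtain ⟨c, hc1, hcN, hcc, hpc⟩ := h31 i hi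
          have hcnex : c ≠ x := by
            intro h; subst h
            exact hcomp_x_ne (label_self_root ⟨hlp, hlc, h3, h4⟩ hx (by exact hcc) ▸ hcc)
          exact ⟨c, hc1, hcN, hcc, by rw [nth_set_ne hcnex]; exact hpc⟩
        · intro i hi
          by_cases hix : i = x
          · subst hix
            obtain ⟨cp, hcp1, hcpN, hcpc, hppc⟩ := h3 p hpN
            refine ⟨cp, ?_, hcpN, ?_, ?_, ?_⟩
            · rw [hset, hcp1]
            · rw [hcpc, ← hcp1, hcomp]
            · intro h; subst h
              exact absurd hcpc hcomp_x_ne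
            · intro hne
              have hd0 : d cp = 0 := by
                obtain ⟨q, hq1, _, _, hqself, _⟩ := h4 cp hcpN
                have hqc2 : (q : Int) = (cp : Int) := hq1.symm.trans hppc
                have : q = cp := by exact_mod_cast hqc2
                exact (hqself this).2
              have : 0 < d i := by have := hdec hpeq; omega
              omega
          · obtain ⟨q, hq1, hqN, hqc, hqself, hqdec⟩ := h41 i hi
            exact ⟨q, by rw [nth_set_ne hix]; exact hq1, hqN, hqc, hqself, hqdec⟩

lemma ixN_lt {N : Nat} {x : Int} (h : InR N x) : ixN N x < N := by
  obtain ⟨h1, h2⟩ := h; unfold ixN; split <;> omega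

lemma pyGetD_ix {N : Nat} {xs : List Int} (hlen : xs.length = N) {x : Int} (h : InR N x) :
    PySem.List.pyGetD xs x 0 = nth xs (ixN N x) := by
  obtain ⟨h1, h2⟩ := h
  by_cases hx : x < 0
  · have hixv : ixN N x = xs.length - (-x).toNat := by unfold ixN; rw [if_pos hx]; omega
    have hxk : x = -(((-x).toNat : Nat) : Int) := by omega
    rw [hixv]
    conv_lhs => rw [hxk]
    rw [PySem.List.pyGetD_neg_natCast xs (-x).toNat 0 (by omega) (by omega),
      nth, List.getD_eq_getElem _ _ (by omega)]
  · have hixv : ixN N x = x.toNat := by unfold ixN; rw [if_neg hx]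
    rw [hixv, PySem.List.pyGetD_eq_getElem xs 0 (by omega) (by omega),
      nth, List.getD_eq_getElem _ _ (by omega)]

lemma pySetD_ix {N : Nat} {xs : List Int} (hlen : xs.length = N) {x : Int} (h : InR N x)
    (v : Int) : PySem.List.pySetD xs x v = xs.set (ixN N x) v := by
  obtain ⟨h1, h2⟩ := h
  by_cases hx : x < 0
  · have hixv : ixN N x = xs.length - (-x).toNat := by unfold ixN; rw [if_pos hx]; omega
    have hxk : x = -(((-x).toNat : Nat) : Int) := by omega
    rw [hixv]
    conv_lhs => rw [hxk]
    unfold PySem.List.pySetD PySem.List.pySet? PySem.List.pyIdx?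
    split
    · rename_i hbad; exfalso; simp at hbad; omega
    · have hmax : ((max (-x) 0).toNat) = (-x).toNat := by omega
      simp [show -x ≤ (xs.length : Int) by omega, hmax]
  · have hixv : ixN N x = x.toNat := by unfold ixN; rw [if_neg hx]
    rw [hixv, PySem.List.pySetD_of_nonneg xs v (by omega)]

-- writing a node's own label over its parent pointer preserves the invariant
lemma set_label_inv {N : Nat} {pre comp : List Int} {d : Nat → Nat}
    (hI : UFInv N pre comp d) {x : Nat} (hx : x < N) :
    UFInv N (pre.set x (nth comp x)) comp d := by
  obtain ⟨hlp, hlc, h3, h4⟩ := hI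
  obtain ⟨c, hc1, hcN, hcc, hcp⟩ := h3 x hx
  have hxlp : x < pre.length := by omega
  refine ⟨by simpa using hlp, hlc, ?_, ?_⟩
  · intro i hi
    obtain ⟨ci, hci1, hciN, hcic, hcip⟩ := h3 i hi
    by_cases hcix : ci = x
    · subst hcix
      refine ⟨ci, hci1, hciN, hcic, ?_⟩
      rw [nth_set_self hxlp, hcic]
    · exact ⟨ci, hci1, hciN, hcic, by rw [nth_set_ne hcix]; exact hcip⟩
  · intro i hi
    by_cases hix : i = x
    · rw [hix]
      refine ⟨c, by rw [nth_set_self hxlp, hc1], hcN, by rw [hcc, hc1], ?_, ?_⟩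
      · intro h; subst h
        obtain ⟨q, hq1, _, _, hqself, _⟩ := h4 c hx
        have hqi : (q : Int) = (c : Int) := hq1.symm.trans hcp
        exact ⟨hc1, (hqself (by exact_mod_cast hqi)).2⟩
      · intro hcx
        have hd0 : d c = 0 := by
          obtain ⟨q, hq1, _, _, hqself, _⟩ := h4 c hcN
          have hqc : (q : Int) = (c : Int) := hq1.symm.trans hcp
          exact (hqself (by exact_mod_cast hqc)).2
        obtain ⟨p0, hp01, _, _, hp0self, hp0dec⟩ := h4 x hx
        have hp0x : p0 ≠ x := by
          intro h
          have hcix : (c : Int) = (x : Int) := hc1.symm.trans ((hp0self h).1)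
          exact hcx (by exact_mod_cast hcix)
        have := hp0dec hp0x
        omega
    · obtain ⟨q, hq1, hqN, hqc, hqself, hqdec⟩ := h4 i hi
      exact ⟨q, by rw [nth_set_ne hix]; exact hq1, hqN, hqc, hqself, hqdec⟩

lemma findA_spec_ix {N : Nat} {comp : List Int} {d : Nat → Nat} {fuel : Nat} {pre : List Int}
    {x : Int} (hI : UFInv N pre comp d) (hx : InR N x) (hfuel : d (ixN N x) + 1 < fuel) :
    ∃ pre', findA fuel pre x = (pre', nth comp (ixN N x)) ∧ UFInv N pre' comp d := by
  by_cases hneg : x < 0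
  · -- negative index: one wrapped read, then the nonneg machinery
    cases fuel with
    | zero => omega
    | succ f =>
      obtain ⟨hlp, hlc, h3, h4⟩ := hI
      have hixlt : ixN N x < N := ixN_lt hx
      obtain ⟨p, hpx, hpN, hcomp, hself, hdec⟩ := h4 (ixN N x) hixlt
      have hget : PySem.List.pyGetD pre x 0 = (p : Int) := by
        rw [pyGetD_ix hlp hx]; exact hpx
      have hdp : d p < f := by
        by_cases hpi : p = ixN N x
        · subst hpi; omega
        · have := hdec hpi; omega
      obtain ⟨pre1, hrec, hI1⟩ := findA_spec f pre p ⟨hlp, hlc, h3, h4⟩ hpN hdp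
      have hx1 : ixN N x < pre1.length := by have := hI1.1; have := hixlt; omega
      refine ⟨pre1.set (ixN N x) (nth comp (ixN N x)), ?_,
        set_label_inv hI1 hixlt⟩
      have hxne : x ≠ (p : Int) := by omega
      simp only [findA, hget]
      rw [if_pos hxne, hrec]
      rw [show PySem.List.pySetD pre1 x (nth comp p) =
        pre1.set (ixN N x) (nth comp p) from pySetD_ix hI1.1 hx _]
      rw [hcomp]
      rw [show PySem.List.pyGetD (pre1.set (ixN N x) (nth comp (ixN N x))) x 0 =
        nth (pre1.set (ixN N x) (nth comp (ixN N x))) (ixN N x) from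
        pyGetD_ix (by simpa using hI1.1) hx]
      rw [nth_set_self hx1]
  · have hxnat : x = ((x.toNat : Nat) : Int) := by omega
    have hix : ixN N x = x.toNat := by unfold ixN; rw [if_neg hneg]
    have hlt : x.toNat < N := by have := hx.2; omega
    obtain ⟨pre', hfind, hI'⟩ := findA_spec fuel pre x.toNat hI hlt (by rw [← hix]; omega)
    refine ⟨pre', ?_, hI'⟩
    rw [hix]
    conv_lhs => rw [hxnat]
    exact hfind

lemma unionA_false {N s : Nat} {pre comp : List Int} {d : Nat → Nat}
    (hI : UFInv N pre comp d) (hs : ∀ i < N, d i ≤ s) (hsN : s + 2 ≤ N)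
    {x1 x2 : Int} (h1 : InR N x1) (h2 : InR N x2)
    (heq : nth comp (ixN N x1) = nth comp (ixN N x2)) :
    ∃ pre', unionA pre x1 x2 = (pre', false) ∧ UFInv N pre' comp d := by
  have hx1n : ixN N x1 < N := ixN_lt h1
  have hx2n : ixN N x2 < N := ixN_lt h2
  obtain ⟨p1, hf1, hI1⟩ := findA_spec_ix (fuel := pre.length) hI h1
    (by rw [hI.1]; have := hs (ixN N x1) hx1n; omega)
  obtain ⟨p2, hf2, hI2⟩ := findA_spec_ix (fuel := p1.length) hI1 h2
    (by rw [hI1.1]; have := hs (ixN N x2) hx2n; omega)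
  exact ⟨p2, by simp [unionA, hf1, hf2, heq], hI2⟩

lemma unionA_true {N s : Nat} {pre comp : List Int} {d : Nat → Nat}
    (hI : UFInv N pre comp d) (hs : ∀ i < N, d i ≤ s) (hsN : s + 2 ≤ N)
    {x1 x2 : Int} (h1 : InR N x1) (h2 : InR N x2)
    (hne : nth comp (ixN N x1) ≠ nth comp (ixN N x2)) :
    ∃ pre', unionA pre x1 x2 = (pre', true) ∧
      UFInv N pre' (comp.map (fun c => if c = nth comp (ixN N x2) then nth comp (ixN N x1) else c))
        (fun i => if nth comp i = nth comp (ixN N x2) then d i + 1 else d i) := by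
  have hx1n : ixN N x1 < N := ixN_lt h1
  have hx2n : ixN N x2 < N := ixN_lt h2
  obtain ⟨p1, hf1, hI1⟩ := findA_spec_ix (fuel := pre.length) hI h1
    (by rw [hI.1]; have := hs (ixN N x1) hx1n; omega)
  obtain ⟨p2, hf2, hI2⟩ := findA_spec_ix (fuel := p1.length) hI1 h2
    (by rw [hI1.1]; have := hs (ixN N x2) hx2n; omega)
  obtain ⟨hlp2, hlc, h3, h4⟩ := hI2
  obtain ⟨c1, hc11, hc1N, hc1c, hc1p⟩ := h3 (ixN N x1) hx1n
  obtain ⟨c2, hc21, hc2N, hc2c, hc2p⟩ := h3 (ixN N x2) hx2n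
  have hc12 : c1 ≠ c2 := by
    intro h; subst h; exact hne (hc11.trans hc21.symm)
  have hc2lp : c2 < p2.length := by omega
  set comp' := comp.map (fun c => if c = nth comp (ixN N x2) then nth comp (ixN N x1) else c) with hcomp'
  have hmap : ∀ i < N, nth comp' i =
      (if nth comp i = nth comp (ixN N x2) then nth comp (ixN N x1) else nth comp i) := by
    intro i hi
    rw [hcomp', nth_map (by omega)]
  have hC2 : nth comp (ixN N x2) = (c2 : Int) := hc21
  have hC1 : nth comp (ixN N x1) = (c1 : Int) := hc11
  have hc1ne2 : (c1 : Int) ≠ (c2 : Int) := by exact_mod_cast hc12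
  refine ⟨p2.set c2 ((c1 : Nat) : Int), ?_, ?_⟩
  · simp only [unionA, hf1, hf2]
    rw [if_pos hne, hC1, hC2]
    rw [PySem.List.pySetD_natCast]
  · refine ⟨by simpa using hlp2, by simp [hcomp', hlc], ?_, ?_⟩
    · -- labels of comp' are idempotent fixpoints of the new forest
      intro i hi
      obtain ⟨c, hc1', hcN', hcc', hpc'⟩ := h3 i hi
      by_cases hcase : nth comp i = nth comp (ixN N x2)
      · refine ⟨c1, ?_, hc1N, ?_, ?_⟩
        · rw [hmap i hi, if_pos hcase, hC1]
        · rw [hmap c1 hc1N, hc1c, hC2, if_neg hc1ne2]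
        · rw [nth_set_ne hc12, hc1p]
      · have hcnec2 : c ≠ c2 := by
          intro h; subst h; exact hcase (hc1'.trans hC2.symm)
        refine ⟨c, ?_, hcN', ?_, ?_⟩
        · rw [hmap i hi, if_neg hcase, hc1']
        · rw [hmap c hcN', hcc', hC2, if_neg (by exact_mod_cast hcnec2)]
        · rw [nth_set_ne hcnec2, hpc']
    · -- one pre-step keeps the new label and decreases the bumped depth
      intro i hi
      by_cases hic2 : i = c2
      · rw [hic2]
        have hd0 : d c1 = 0 := by
          obtain ⟨q, hq1, _, _, hqself, _⟩ := h4 c1 hc1N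
          have hqc : (q : Int) = (c1 : Int) := hq1.symm.trans hc1p
          exact (hqself (by exact_mod_cast hqc)).2
        refine ⟨c1, nth_set_self hc2lp _, hc1N, ?_, ?_, ?_⟩
        · rw [hmap c1 hc1N, hmap c2 hc2N, hc1c, hc2c, hC2, hC1]
          simp [hc1ne2]
        · intro h; exact absurd h hc12
        · intro _
          simp [hc1c, hc2c, hC2, hc1ne2, hd0]
      · obtain ⟨q, hq1, hqN, hqc, hqself, hqdec⟩ := h4 i hi
        refine ⟨q, by rw [nth_set_ne hic2]; exact hq1, hqN, ?_, ?_, ?_⟩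
        · rw [hmap q hqN, hmap i hi, hqc]
        · intro h; subst h
          obtain ⟨hci, hdi⟩ := hqself rfl
          have hine : nth comp q ≠ nth comp (ixN N x2) := by
            rw [hci, hC2]; exact_mod_cast fun h => hic2 (by exact_mod_cast h)
          constructor
          · rw [hmap q hqN, if_neg hine, hci]
          · simp only [if_neg hine, hdi]
        · intro h
          have := hqdec h
          simp only [hqc]
          split <;> omega

lemma step_spec {N s : Nat} {chs : List Int}
    {stA : List Int × List Int × PySem.Dict Int Int × List (List Int)}
    {stB : List Int × List Int × Option (List Int × List Int) × PySem.Dict Int Int}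
    {u v : Int} (hok : v ∈ chs ∨ (InR N u ∧ InR N v))
    (h : StInv N s chs stA stB) (hsN : s + 2 ≤ N) :
    StInv N (s + 1) (chs ++ [v]) (stepA stA [u, v]) (stepB stB [u, v]) := by
  obtain ⟨⟨d, hI, hds⟩, hlast, hpar, hcand, hcont⟩ := h
  by_cases hc : stB.2.2.2.contains v = true
  · -- duplicate-parent edge: no union on either side
    have hcA : stA.2.2.1.contains v = true := by rw [hpar]; exact hc
    have hvchs : v ∈ chs := (hcont v).mp hcA
    simp only [stepA, stepB, hcA, hc, if_pos]
    refine ⟨⟨d, hI, fun i hi => le_trans (hds i hi) (by omega)⟩, hlast, hpar, ?_, ?_⟩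
    · cases hB : stB.2.2.1 with
      | none =>
        have hnil : stA.2.2.2 = [] := by rw [hB] at hcand; exact hcand
        simp [CandRel, hnil, hpar]
      | some c =>
        have hrest : ∃ rest, stA.2.2.2 = c.1 :: c.2 :: rest := by rw [hB] at hcand; exact hcand
        obtain ⟨rest, hrest⟩ := hrest
        exact ⟨rest ++ [[stA.2.2.1.getD v 0, v], [u, v]], by simp [hrest]⟩
    · intro x
      rw [List.mem_append]
      constructor
      · intro hx; exact Or.inl ((hcont x).mp hx)
      · intro hx
        rcases hx with hx | hx
        · exact (hcont x).mpr hx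
        · simp at hx; subst hx; exact hcA
  · -- fresh edge: A unions, B compares and relabels
    have hc' : stB.2.2.2.contains v = false := by simpa using hc
    have hcA : stA.2.2.1.contains v = false := by rw [hpar]; exact hc'
    have hvnot : v ∉ chs := fun hv => by
      have := (hcont v).mpr hv; rw [hpar] at this; simp [hc'] at this
    obtain ⟨hU, hV⟩ := hok.resolve_left hvnot
    have hgu : PySem.List.pyGetD stB.1 u 0 = nth stB.1 (ixN N u) := pyGetD_ix hI.2.1 hU
    have hgv : PySem.List.pyGetD stB.1 v 0 = nth stB.1 (ixN N v) := pyGetD_ix hI.2.1 hV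
    have hpar' : stA.2.2.1.insert v u = stB.2.2.2.insert v u := by rw [hpar]
    have hcont' : ∀ x : Int, (stA.2.2.1.insert v u).contains x = true ↔ x ∈ chs ++ [v] := by
      intro x
      rw [PySem.Dict.contains_insert, List.mem_append]
      simp only [Bool.or_eq_true, beq_iff_eq, hcont x]
      simp [or_comm]
    by_cases heq : nth stB.1 (ixN N u) = nth stB.1 (ixN N v)
    · obtain ⟨pre', hun, hI'⟩ := unionA_false hI hds hsN hU hV heq
      simp only [stepA, stepB, hcA, hc', Bool.false_eq_true, if_false, hun, hgu, hgv, heq,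
        if_pos]
      exact ⟨⟨d, hI', fun i hi => le_trans (hds i hi) (by omega)⟩, rfl, hpar', hcand, hcont'⟩
    · obtain ⟨pre', hun, hI'⟩ := unionA_true hI hds hsN hU hV heq
      simp only [stepA, stepB, hcA, hc', Bool.false_eq_true, if_false, hun, hgu, hgv, heq,
        if_pos]
      refine ⟨⟨fun i => if nth stB.1 i = nth stB.1 (ixN N v) then d i + 1 else d i, hI', ?_⟩,
        hlast, hpar', hcand, hcont'⟩
      intro i hi
      have := hds i hi
      dsimp only
      split <;> omega

lemma loop_spec {N : Nat} : ∀ (todo : List (List Int)) {s : Nat} {chs : List Int}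
    {stA : List Int × List Int × PySem.Dict Int Int × List (List Int)}
    {stB : List Int × List Int × Option (List Int × List Int) × PySem.Dict Int Int},
    (∀ i < todo.length, ∃ u v : Int, todo.getD i [] = [u, v] ∧
      (v ∈ chs ++ (todo.take i).map (fun e => e.getD 1 0) ∨ (InR N u ∧ InR N v))) →
    StInv N s chs stA stB → s + todo.length + 1 ≤ N →
    StInv N (s + todo.length) (chs ++ todo.map (fun e => e.getD 1 0))
      (todo.foldl stepA stA) (todo.foldl stepB stB) := by
  intro todo
  induction todo with
  | nil => intro s chs stA stB _ h _; simpa using h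
  | cons e t ih =>
    intro s chs stA stB hwf h hlen
    obtain ⟨u, v, he, hok⟩ := hwf 0 (by simp)
    have he' : e = [u, v] := by simpa using he
    subst he'
    have h1 := step_spec (by simpa using hok) h (by simp at hlen; omega)
    have h2 := ih (fun i hi => ?_) h1 (by simp at hlen; omega)
    · simp only [List.foldl_cons, List.length_cons, List.map_cons]
      rw [show s + (t.length + 1) = s + 1 + t.length by omega,
        show chs ++ ([u, v].getD 1 0 :: t.map (fun e => e.getD 1 0)) =
          (chs ++ [([u, v] : List Int).getD 1 0]) ++ t.map (fun e => e.getD 1 0) by simp]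
      exact h2
    · obtain ⟨u', v', he2, hok2⟩ := hwf (i + 1) (by simp; omega)
      refine ⟨u', v', by simpa using he2, ?_⟩
      rcases hok2 with hmem | hb
      · left
        have : (([u, v] : List Int) :: t).take (i + 1) = ([u, v] : List Int) :: t.take i := rfl
        rw [this] at hmem
        simpa [List.append_assoc] using hmem
      · right; exact hb

lemma nth_range_map {N i : Nat} (h : i < N) : nth ((List.range N).map Int.ofNat) i = (i : Int) := by
  rw [nth, List.getD_eq_getElem _ _ (by simpa using h)]
  simp

lemma init_inv (N : Nat) :
    UFInv N ((List.range N).map Int.ofNat) ((List.range N).map Int.ofNat)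
      (fun _ => 0) := by
  refine ⟨by simp, by simp, fun i hi => ⟨i, ?_⟩, fun i hi => ⟨i, ?_⟩⟩ <;>
    simp [nth_range_map hi, hi]

-- ===== VERDICT (by name: the statement is the Claim_ definition above) =====
theorem findRedundantDirectedConnection_spec : Claim_equal_findRedundantDirectedConnection := by
  intro edges _ hPre
  unfold Spec_findRedundantDirectedConnection
  unfold findRedundantDirectedConnection findRedundantDirectedConnection_alt
  dsimp only
  have hwf : ∀ i < edges.length, ∃ u v : Int, edges.getD i [] = [u, v] ∧
      (v ∈ ([] : List Int) ++ (edges.take i).map (fun e => e.getD 1 0) ∨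
        (InR (edges.length + 1) u ∧ InR (edges.length + 1) v)) := by
    intro i hi
    obtain ⟨hlen2, hcond⟩ := hPre i hi
    obtain ⟨u, v, hee⟩ := List.length_eq_two.mp hlen2
    refine ⟨u, v, hee, ?_⟩
    rw [hee] at hcond
    simp only [List.getD_cons_succ, List.getD_cons_zero] at hcond
    rcases hcond with hmem | hb
    · left; simpa using hmem
    · right
      refine ⟨⟨?_, ?_⟩, ⟨?_, ?_⟩⟩ <;> push_cast <;> omega
  have hinit : StInv (edges.length + 1) 0 []
      ((List.range (edges.length + 1)).map Int.ofNat, ([] : List Int),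
        (PySem.Dict.empty : PySem.Dict Int Int), ([] : List (List Int)))
      ((List.range (edges.length + 1)).map Int.ofNat, ([] : List Int),
        (none : Option (List Int × List Int)), (PySem.Dict.empty : PySem.Dict Int Int)) :=
    ⟨⟨fun _ => 0, init_inv _, fun _ _ => le_refl 0⟩, rfl, rfl, rfl,
      by intro x; simp [PySem.Dict.contains_empty]⟩
  have hfin := loop_spec edges hwf hinit (by omega)
  set stA := edges.foldl stepA
    ((List.range (edges.length + 1)).map Int.ofNat, ([] : List Int),
      (PySem.Dict.empty : PySem.Dict Int Int), ([] : List (List Int))) with hstA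
  set stB := edges.foldl stepB
    ((List.range (edges.length + 1)).map Int.ofNat, ([] : List Int),
      (none : Option (List Int × List Int)), (PySem.Dict.empty : PySem.Dict Int Int)) with hstB
  obtain ⟨_, hlast, _, hcand, _⟩ := hfin
  cases hB : stB.2.2.1 with
  | none =>
    have hnil : stA.2.2.2 = [] := by rw [hB] at hcand; exact hcand
    rw [if_pos hnil, hlast]
  | some c =>
    have hrest : ∃ rest, stA.2.2.2 = c.1 :: c.2 :: rest := by rw [hB] at hcand; exact hcand
    obtain ⟨rest, hrest⟩ := hrest
    rw [hrest, hlast, if_neg (by simp)]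
    by_cases hl : stB.2.1 = []
    · rw [if_neg (by simp [hl])]
      show (c.1 :: c.2 :: rest).getD 1 [] = if stB.2.1 ≠ [] then c.1 else c.2
      rw [if_neg (by simp [hl])]
      rfl
    · rw [if_pos hl]
      show (c.1 :: c.2 :: rest).getD 0 [] = if stB.2.1 ≠ [] then c.1 else c.2
      rw [if_pos hl]
      rfl
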